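-- pv_equiv track=rewrite | github.com/amelitasantiago/SpeakEZ-Hand-Gesture-Speech-ML | ui/app_hybrid_simple.py | check_pattern_match
-- ===== SOURCE A (Python) =====
-- def check_pattern_match(letter_buffer, patterns, lookback=10):
--     if not letter_buffer or len(letter_buffer) < 2:
--         return None, None
--
--     recent = ''.join(list(letter_buffer)[-lookback:])
--     sorted_patterns = sorted(patterns.items(), key=lambda x: len(x[0]), reverse=True)
--
--     for pattern, word in sorted_patterns:
--         if pattern in recent:
--             return pattern, word
--
--     return None, None
-- ===== SOURCE B (Python) =====
-- def check_pattern_match(letter_buffer, patterns, lookback=10):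
--     if not letter_buffer or len(letter_buffer) < 2:
--         return None, None
--
--     recent = ''.join(list(letter_buffer)[-lookback:])
--
--     # Single pass, no sort: keep the first pattern of maximal length that
--     # occurs in `recent` (strict-improvement rule preserves insertion-order
--     # tie-breaking of the stable descending sort).
--     best = None
--     for pattern, word in patterns.items():
--         if (best is None or len(best[0]) < len(pattern)) and pattern in recent:
--             best = (pattern, word)
--
--     if best is None:
--         return None, None
--     return best[0], best[1]
-- ===== Notes on version B (the rewrite author's own statement) =====
-- stated objective: alternative
-- what changed: Replaces sort-all-patterns-by-length-then-scan with a single fold over the dict that keeps the first strictly-longer matching pattern, removing the O(P log P) sort and the materialised sorted list (measured ~1.3x, below the 1.5x bar, so not claimed as faster).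
import Mathlib
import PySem

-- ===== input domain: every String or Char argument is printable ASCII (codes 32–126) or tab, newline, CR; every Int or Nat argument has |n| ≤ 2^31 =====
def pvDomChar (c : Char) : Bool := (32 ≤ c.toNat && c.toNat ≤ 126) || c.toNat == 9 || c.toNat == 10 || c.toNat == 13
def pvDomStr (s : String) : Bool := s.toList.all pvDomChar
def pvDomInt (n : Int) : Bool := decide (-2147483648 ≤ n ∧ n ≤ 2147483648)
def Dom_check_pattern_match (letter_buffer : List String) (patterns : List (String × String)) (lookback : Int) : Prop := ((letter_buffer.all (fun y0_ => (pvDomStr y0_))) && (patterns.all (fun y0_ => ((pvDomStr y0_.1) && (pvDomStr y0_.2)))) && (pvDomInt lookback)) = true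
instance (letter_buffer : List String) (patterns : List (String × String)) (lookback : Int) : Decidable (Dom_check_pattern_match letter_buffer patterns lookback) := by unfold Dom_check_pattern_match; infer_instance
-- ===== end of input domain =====

-- B replaces A's sort-by-length-then-scan with one fold keeping the first strictly-longest
-- matching pattern (objective: alternative — avoids the sort; same return values).

-- ===== PORT A =====
-- the for-loop of A: return the first (pattern, word) whose pattern occurs in recent
def cpmScan (recent : String) : List (String × String) → Option String × Option String
  | [] => (none, none)
  | (p, w) :: rest =>
    if PySem.Str.isIn p recent then (some p, some w) else cpmScan recent rest

def check_pattern_match (letter_buffer : List String) (patterns : List (String × String)) (lookback : Int) : Option String × Option String :=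
  if letter_buffer = [] ∨ letter_buffer.length < 2 then (none, none)
  else
    let recent := PySem.Str.join "" (PySem.List.slice letter_buffer (some (-lookback)) none)
    let sorted_patterns := PySem.List.sorted patterns (fun x => PySem.Str.len x.1) true
    cpmScan recent sorted_patterns

-- ===== PORT B =====
-- B's loop body: replace best only by a strictly longer pattern occurring in recent
def cpmBest (recent : String) (best : Option (String × String)) (pw : String × String) : Option (String × String) :=
  if (match best with
      | none => true
      | some b => decide (PySem.Str.len b.1 < PySem.Str.len pw.1)) && PySem.Str.isIn pw.1 recent
  then some pw else best

def check_pattern_match_alt (letter_buffer : List String) (patterns : List (String × String)) (lookback : Int) : Option String × Option String :=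
  if letter_buffer = [] ∨ letter_buffer.length < 2 then (none, none)
  else
    let recent := PySem.Str.join "" (PySem.List.slice letter_buffer (some (-lookback)) none)
    match patterns.foldl (cpmBest recent) none with
    | none => (none, none)
    | some b => (some b.1, some b.2)

-- ===== PRECONDITION & SPEC =====
def Spec_check_pattern_match (letter_buffer : List String) (patterns : List (String × String)) (lookback : Int) (out : Option String × Option String) : Prop := out = check_pattern_match_alt letter_buffer patterns lookback
instance (letter_buffer : List String) (patterns : List (String × String)) (lookback : Int) (out : Option String × Option String) : Decidable (Spec_check_pattern_match letter_buffer patterns lookback out) := by unfold Spec_check_pattern_match; infer_instance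

-- ===== CLAIM (what is proved, stated in full; the proofs are below) =====
def Claim_equal_check_pattern_match : Prop := ∀ (letter_buffer : List String) (patterns : List (String × String)) (lookback : Int), Dom_check_pattern_match letter_buffer patterns lookback → Spec_check_pattern_match letter_buffer patterns lookback (check_pattern_match letter_buffer patterns lookback)

-- ===== LEMMAS AND PROOFS =====

theorem cpmBest_none (recent : String) (pw : String × String) :
    cpmBest recent none pw =
      (if PySem.Str.isIn pw.1 recent = true then some pw else none) := rfl

theorem cpmBest_some (recent : String) (b pw : String × String) :
    cpmBest recent (some b) pw =
      (if (decide (PySem.Str.len b.1 < PySem.Str.len pw.1) && PySem.Str.isIn pw.1 recent) = true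
       then some pw else some b) := rfl

theorem insertBy_nil {a : Type} (before : a -> a -> Bool) (x : a) :
    PySem.List.insertBy before x [] = [x] := rfl

theorem insertBy_cons {a : Type} (before : a -> a -> Bool) (x y : a) (ys : List a) :
    PySem.List.insertBy before x (y :: ys) =
      (if before x y then x :: y :: ys else y :: PySem.List.insertBy before x ys) := rfl

-- A's scan is find? followed by unpacking the pair
theorem cpmScan_eq_find (recent : String) (l : List (String × String)) :
    cpmScan recent l =
      match l.find? (fun pw => PySem.Str.isIn pw.1 recent) with
      | none => (none, none)
      | some b => (some b.1, some b.2) := by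
  induction l with
  | nil => rfl
  | cons y t ih =>
    obtain ⟨p, w⟩ := y
    cases h : PySem.Str.isIn p recent with
    | true => simp only [cpmScan, List.find?, h, if_true]
    | false => simp only [cpmScan, List.find?, h, if_false, Bool.false_eq_true, ih]

-- once the fold carries some value it never returns to none
theorem cpmFold_some_ne_none (recent : String) (l : List (String × String)) :
    ∀ c, l.foldl (cpmBest recent) (some c) ≠ none := by
  induction l with
  | nil => intro c h; simp at h
  | cons y t ih =>
    intro c
    rw [List.foldl_cons, cpmBest_some]
    split
    · exact ih y
    · exact ih c

-- B's fold returns none iff nothing matched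
theorem cpmFold_none_iff (recent : String) (l : List (String × String)) :
    l.foldl (cpmBest recent) none = none ↔
      ∀ pw ∈ l, PySem.Str.isIn pw.1 recent = false := by
  induction l with
  | nil => simp
  | cons y t ih =>
    rw [List.foldl_cons, cpmBest_none]
    cases hy : PySem.Str.isIn y.1 recent with
    | true =>
      rw [if_pos rfl]
      constructor
      · intro h; exact absurd h (cpmFold_some_ne_none recent t y)
      · intro h
        have hf := h y (List.mem_cons_self)
        rw [hy] at hf; cases hf
    | false =>
      rw [if_neg Bool.false_ne_true, ih]
      constructor
      · intro h pw hpw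
        rcases List.mem_cons.mp hpw with rfl | hpw
        · exact hy
        · exact h pw hpw
      · intro h pw hpw
        exact h pw (List.mem_cons_of_mem _ hpw)

-- the running best's length never decreases
theorem cpmFold_mono (recent : String) (l : List (String × String)) :
    ∀ c b, l.foldl (cpmBest recent) (some c) = some b →
      PySem.Str.len c.1 ≤ PySem.Str.len b.1 := by
  induction l with
  | nil => intro c b h; simp_all
  | cons y t ih =>
    intro c b h
    rw [List.foldl_cons, cpmBest_some] at h
    split at h
    · rename_i hcond
      simp only [Bool.and_eq_true, decide_eq_true_eq] at hcond
      exact le_of_lt (lt_of_lt_of_le hcond.1 (ih y b h))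
    · exact ih c b h

-- if B's fold (from none) yields some b, then b is a match of l whose length
-- dominates every match of l
theorem cpmFold_some (recent : String) (l : List (String × String)) :
    ∀ acc b, l.foldl (cpmBest recent) acc = some b →
      (acc = some b ∨ (b ∈ l ∧ PySem.Str.isIn b.1 recent = true)) ∧
      ∀ y ∈ l, PySem.Str.isIn y.1 recent = true →
        PySem.Str.len y.1 ≤ PySem.Str.len b.1 := by
  induction l with
  | nil => intro acc b h; simp_all
  | cons z t ih =>
    intro acc b h
    rw [List.foldl_cons] at h
    -- step analysis: what did cpmBest acc z produce?
    cases acc with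
    | none =>
      rw [cpmBest_none] at h
      cases hz : PySem.Str.isIn z.1 recent with
      | true =>
        rw [if_pos hz] at h
        have hmain := ih (some z) b h
        have hzb : PySem.Str.len z.1 ≤ PySem.Str.len b.1 := cpmFold_mono recent t z b h
        refine ⟨?_, ?_⟩
        · rcases hmain.1 with h1 | h1
          · obtain rfl := Option.some_inj.mp h1
            exact Or.inr ⟨List.mem_cons_self, hz⟩
          · exact Or.inr ⟨List.mem_cons_of_mem _ h1.1, h1.2⟩
        · intro y hy hmy
          rcases List.mem_cons.mp hy with rfl | hy
          · exact hzb
          · exact hmain.2 y hy hmy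
      | false =>
        rw [if_neg (by rw [hz]; exact Bool.false_ne_true)] at h
        have hmain := ih none b h
        refine ⟨?_, ?_⟩
        · rcases hmain.1 with h1 | h1
          · exact absurd h1 (by simp)
          · exact Or.inr ⟨List.mem_cons_of_mem _ h1.1, h1.2⟩
        · intro y hy hmy
          rcases List.mem_cons.mp hy with rfl | hy
          · rw [hz] at hmy; cases hmy
          · exact hmain.2 y hy hmy
    | some a =>
      rw [cpmBest_some] at h
      split at h
      · rename_i hcond
        simp only [Bool.and_eq_true, decide_eq_true_eq] at hcond
        have hmain := ih (some z) b h
        have hzb : PySem.Str.len z.1 ≤ PySem.Str.len b.1 := cpmFold_mono recent t z b h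
        refine ⟨?_, ?_⟩
        · rcases hmain.1 with h1 | h1
          · obtain rfl := Option.some_inj.mp h1
            exact Or.inr ⟨List.mem_cons_self, hcond.2⟩
          · exact Or.inr ⟨List.mem_cons_of_mem _ h1.1, h1.2⟩
        · intro y hy hmy
          rcases List.mem_cons.mp hy with rfl | hy
          · exact hzb
          · exact hmain.2 y hy hmy
      · rename_i hcond
        have hmain := ih (some a) b h
        have hab : PySem.Str.len a.1 ≤ PySem.Str.len b.1 := cpmFold_mono recent t a b h
        refine ⟨?_, ?_⟩
        · rcases hmain.1 with h1 | h1
          · exact Or.inl h1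
          · exact Or.inr ⟨List.mem_cons_of_mem _ h1.1, h1.2⟩
        · intro y hy hmy
          rcases List.mem_cons.mp hy with rfl | hy
          · -- y (=z) matched but was not taken: len y ≤ len a ≤ len b
            have : ¬ PySem.Str.len a.1 < PySem.Str.len y.1 := by
              intro hlt
              exact hcond (by rw [hmy, Bool.and_true, decide_eq_true hlt])
            omega
          · exact hmain.2 y hy hmy

-- find? through insertBy: a non-matching insertion is invisible
theorem find_insertBy_not (recent : String) (x : String × String)
    (hpx : PySem.Str.isIn x.1 recent = false) :
    ∀ s : List (String × String),
      (PySem.List.insertBy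
        (fun a b => decide (PySem.Str.len b.1 < PySem.Str.len a.1)) x s).find?
          (fun pw => PySem.Str.isIn pw.1 recent) =
        s.find? (fun pw => PySem.Str.isIn pw.1 recent) := by
  intro s
  induction s with
  | nil => simp only [insertBy_nil, List.find?, hpx]
  | cons y t ih =>
    rw [insertBy_cons]
    split
    · simp only [List.find?, hpx]
    · cases hpy : PySem.Str.isIn y.1 recent with
      | true => simp only [List.find?, hpy]
      | false => simp only [List.find?, hpy, ih]

-- find? through insertBy: if a match at least as long precedes x, nothing changes
theorem find_insertBy_high (recent : String) (x : String × String) :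
    ∀ s : List (String × String),
      s.Pairwise (fun a b => PySem.Str.len b.1 ≤ PySem.Str.len a.1) →
      (∃ y ∈ s, PySem.Str.isIn y.1 recent = true ∧
        PySem.Str.len x.1 ≤ PySem.Str.len y.1) →
      (PySem.List.insertBy
        (fun a b => decide (PySem.Str.len b.1 < PySem.Str.len a.1)) x s).find?
          (fun pw => PySem.Str.isIn pw.1 recent) =
        s.find? (fun pw => PySem.Str.isIn pw.1 recent) := by
  intro s
  induction s with
  | nil => rintro _ ⟨y, hy, _⟩; simp at hy
  | cons z t ih =>
    rintro hpair ⟨y, hy, hpy, hxy⟩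
    have hhead := (List.pairwise_cons.mp hpair).1
    have hpair' := (List.pairwise_cons.mp hpair).2
    rw [insertBy_cons]
    split
    · rename_i hbefore
      simp only [decide_eq_true_eq] at hbefore
      exfalso
      rcases List.mem_cons.mp hy with rfl | hy
      · omega
      · have := hhead y hy; omega
    · cases hpz : PySem.Str.isIn z.1 recent with
      | true => simp only [List.find?, hpz]
      | false =>
        simp only [List.find?, hpz]
        rcases List.mem_cons.mp hy with rfl | hy
        · rw [hpy] at hpz; cases hpz
        · exact ih hpair' ⟨y, hy, hpy, hxy⟩

-- find? through insertBy: if every match is strictly shorter, x is the first match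
theorem find_insertBy_new (recent : String) (x : String × String)
    (hpx : PySem.Str.isIn x.1 recent = true) :
    ∀ s : List (String × String),
      (∀ y ∈ s, PySem.Str.isIn y.1 recent = true →
        PySem.Str.len y.1 < PySem.Str.len x.1) →
      (PySem.List.insertBy
        (fun a b => decide (PySem.Str.len b.1 < PySem.Str.len a.1)) x s).find?
          (fun pw => PySem.Str.isIn pw.1 recent) = some x := by
  intro s
  induction s with
  | nil => intro _; simp only [insertBy_nil, List.find?, hpx]
  | cons z t ih =>
    intro hall
    rw [insertBy_cons]
    split
    · simp only [List.find?, hpx]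
    · rename_i hbefore
      simp only [decide_eq_true_eq, not_lt] at hbefore
      have hpz : PySem.Str.isIn z.1 recent = false := by
        cases h : PySem.Str.isIn z.1 recent with
        | false => rfl
        | true => exact absurd (hall z (by simp) h) (by omega)
      simp only [List.find?, hpz]
      exact ih (fun y hy => hall y (by simp [hy]))

-- stable descending sort then first match  =  single fold keeping first strict improver
set_option maxHeartbeats 1000000 in
theorem cpm_core (recent : String) (l : List (String × String)) :
    cpmScan recent (PySem.List.sorted l (fun x => PySem.Str.len x.1) true) =
      match l.foldl (cpmBest recent) none with
      | none => (none, none)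
      | some b => (some b.1, some b.2) := by
  induction l using List.reverseRecOn with
  | nil => rfl
  | append_singleton l x ih =>
    have hsort : PySem.List.sorted (l ++ [x]) (fun x => PySem.Str.len x.1) true =
        PySem.List.insertBy
          (fun a b => decide (PySem.Str.len b.1 < PySem.Str.len a.1)) x
          (PySem.List.sorted l (fun x => PySem.Str.len x.1) true) := by
      rw [PySem.List.sorted_rev_eq_foldl_insertBy, PySem.List.sorted_rev_eq_foldl_insertBy,
        List.foldl_append, List.foldl_cons, List.foldl_nil]
    rw [hsort, List.foldl_append, List.foldl_cons, List.foldl_nil]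
    rw [cpmScan_eq_find] at ih ⊢
    -- abstract the sorted list to keep unification cheap
    obtain ⟨s, hs, hmem, hpair⟩ :
        ∃ s, PySem.List.sorted l (fun x => PySem.Str.len x.1) true = s ∧
          (∀ y, y ∈ s ↔ y ∈ l) ∧
          s.Pairwise (fun a b => PySem.Str.len b.1 ≤ PySem.Str.len a.1) :=
      ⟨_, rfl, fun y => PySem.List.mem_sorted l _ true y,
        PySem.List.sorted_pairwise_rev l _⟩
    rw [hs] at ih ⊢
    cases hpx : PySem.Str.isIn x.1 recent with
    | false =>
      -- x does not match: invisible on both sides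
      rw [find_insertBy_not recent x hpx]
      have hstep : cpmBest recent (l.foldl (cpmBest recent) none) x =
          l.foldl (cpmBest recent) none := by
        cases l.foldl (cpmBest recent) none with
        | none => rw [cpmBest_none, if_neg (by rw [hpx]; exact Bool.false_ne_true)]
        | some a =>
          rw [cpmBest_some,
            if_neg (by rw [hpx, Bool.and_false]; exact Bool.false_ne_true)]
      rw [hstep]
      exact ih
    | true =>
      cases hb : l.foldl (cpmBest recent) none with
      | none =>
        -- nothing in l matched, so x becomes the first and only match
        have hnone := (cpmFold_none_iff recent l).mp hb
        have hall : ∀ y ∈ s, PySem.Str.isIn y.1 recent = true →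
            PySem.Str.len y.1 < PySem.Str.len x.1 := by
          intro y hy hmy
          have hf := hnone y ((hmem y).mp hy)
          rw [hf] at hmy; cases hmy
        rw [find_insertBy_new recent x hpx s hall]
        rw [cpmBest_none, if_pos hpx]
      | some b =>
        have hsome := cpmFold_some recent l none b hb
        have hbl : b ∈ l ∧ PySem.Str.isIn b.1 recent = true := by
          rcases hsome.1 with h | h
          · exact absurd h (by simp)
          · exact h
        by_cases hlen : PySem.Str.len x.1 ≤ PySem.Str.len b.1
        · -- a match at least as long already present: both sides unchanged
          rw [find_insertBy_high recent x s hpair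
            ⟨b, (hmem b).mpr hbl.1, hbl.2, hlen⟩]
          have hstep : cpmBest recent (some b) x = some b := by
            have hd : decide (PySem.Str.len b.1 < PySem.Str.len x.1) = false := by
              simp only [decide_eq_false_iff_not, not_lt]; exact hlen
            rw [cpmBest_some,
              if_neg (by rw [hd, Bool.false_and]; exact Bool.false_ne_true)]
          rw [hstep, ← hb]
          exact ih
        · -- x strictly longer than every match of l
          have hall : ∀ y ∈ s, PySem.Str.isIn y.1 recent = true →
              PySem.Str.len y.1 < PySem.Str.len x.1 := by
            intro y hy hmy
            have := hsome.2 y ((hmem y).mp hy) hmy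
            omega
          rw [find_insertBy_new recent x hpx s hall]
          have hstep : cpmBest recent (some b) x = some x := by
            have hd : decide (PySem.Str.len b.1 < PySem.Str.len x.1) = true := by
              simp only [decide_eq_true_eq]; omega
            rw [cpmBest_some, if_pos (by rw [hd, Bool.true_and]; exact hpx)]
          rw [hstep]

-- ===== VERDICT (by name: the statement is the Claim_ definition above) =====
theorem check_pattern_match_spec : Claim_equal_check_pattern_match := by
  intro letter_buffer patterns lookback _
  unfold Spec_check_pattern_match check_pattern_match check_pattern_match_alt
  by_cases hguard : letter_buffer = [] ∨ letter_buffer.length < 2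
  · simp only [hguard, if_true]
  · simp only [hguard, if_false]
    exact cpm_core _ patterns
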